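-- pv_equiv track=rewrite | github.com/LouisVonRichter/Advent-of-Code | 2020/Day-7/Day-7.py | check_bag
-- ===== SOURCE A (Python) =====
-- def check_bag(bags, my_bag, current_bag):
--     if current_bag == my_bag:
--         return 1
--     if bags.get(current_bag) is None:
--         return 0
--     else:
--         counts = []
--         for k, v in bags[current_bag].items():
--             counts.append(check_bag(bags, my_bag, k))
--         return max(counts)
-- ===== SOURCE B (Python) =====
-- def check_bag(bags, my_bag, current_bag):
--     # Saturate the set of bags reachable from current_bag (not expanding my_bag);
--     # len(bags) + 1 rounds are enough, since shortest paths repeat no key.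
--     reach = {current_bag}
--     for _ in range(len(bags) + 1):
--         for b in list(reach):
--             if b != my_bag and b in bags:
--                 reach.update(bags[b])
--     return 1 if my_bag in reach else 0
-- ===== Notes on version B (the rewrite author's own statement) =====
-- stated objective: alternative
-- what changed: A decides whether my_bag is reachable by exhaustively recursing over every path of the bag graph (diverging on cycles, ValueError on an empty rule); B instead saturates a reachable-bag set with len(bags)+1 breadth-first rounds and tests membership, trading A's depth-first path enumeration for a total set-closure computation.
import Mathlib
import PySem

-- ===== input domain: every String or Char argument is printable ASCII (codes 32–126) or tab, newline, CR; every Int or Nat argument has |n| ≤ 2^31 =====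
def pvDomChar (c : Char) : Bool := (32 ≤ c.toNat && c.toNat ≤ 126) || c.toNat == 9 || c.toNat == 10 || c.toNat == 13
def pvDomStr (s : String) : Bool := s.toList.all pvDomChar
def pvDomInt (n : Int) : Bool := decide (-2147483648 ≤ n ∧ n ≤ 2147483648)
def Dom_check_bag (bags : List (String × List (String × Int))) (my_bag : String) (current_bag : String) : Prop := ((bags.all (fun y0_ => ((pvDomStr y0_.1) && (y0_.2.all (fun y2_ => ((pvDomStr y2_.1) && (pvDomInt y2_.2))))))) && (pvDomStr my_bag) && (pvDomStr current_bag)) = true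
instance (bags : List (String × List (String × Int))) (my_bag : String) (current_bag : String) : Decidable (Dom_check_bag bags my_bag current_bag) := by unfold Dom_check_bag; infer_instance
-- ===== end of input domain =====

-- B replaces A's exhaustive path-by-path recursion by a saturating closure of the reachable-bag
-- set followed by one membership test; the two ports are proved equal, Pre_ only excludes inputs
-- where the Python A raises ValueError or recurses forever.

-- ===== PORT A =====
-- literal transliteration of A's recursion; the fuel bags.length+1 bounds the recursion depth,
-- which Python never exceeds inside Pre_ (there every recursion path repeats no key of bags).
def check_bag_go (bags : List (String × List (String × Int))) (my_bag : String) :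
    Nat → String → Int
  | 0, _ => 0  -- never reached inside Pre_
  | fuel + 1, current_bag =>
    if current_bag == my_bag then 1
    else
      match PySem.Dict.get? (PySem.Dict.mk bags) current_bag with
      | none => 0
      | some items =>
        let counts := items.foldl (fun acc kv => acc ++ [check_bag_go bags my_bag fuel kv.1]) []
        -- Python's max(counts) raises ValueError on an empty list; that input is outside Pre_
        (PySem.List.max? counts (fun x => x)).getD 0

def check_bag (bags : List (String × List (String × Int))) (my_bag : String) (current_bag : String) : Int :=
  check_bag_go bags my_bag (bags.length + 1) current_bag

-- ===== PORT B =====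
-- one saturation round: 'for b in list(reach): if b != my_bag and b in bags: reach.update(bags[b])'
def altStep (bags : List (String × List (String × Int))) (my_bag : String)
    (S : PySem.Set String) : PySem.Set String :=
  S.foldl (fun acc b =>
    if b != my_bag && PySem.Dict.contains (PySem.Dict.mk bags) b then
      PySem.Set.update acc ((((PySem.Dict.mk bags).get? b).getD []).map Prod.fst)
    else acc) S

def check_bag_alt (bags : List (String × List (String × Int))) (my_bag : String) (current_bag : String) : Int :=
  let reach := (List.range (bags.length + 1)).foldl
    (fun S _ => altStep bags my_bag S) (PySem.Set.ofList [current_bag])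
  if PySem.Set.contains reach my_bag then 1 else 0

-- ===== PRECONDITION & SPEC =====
-- helpers for Pre_: the set of bags A's recursion visits (stopping at my_bag), via a closure
def pvKids (bags : List (String × List (String × Int))) (b : String) : List String :=
  (((PySem.Dict.mk bags).get? b).getD []).map Prod.fst

def pvStep (bags : List (String × List (String × Int))) (my_bag : String) (S : List String) : List String :=
  PySem.Set.ofList (S ++ (S.filter (fun b => b ≠ my_bag)).flatMap (pvKids bags))

def pvIter (bags : List (String × List (String × Int))) (my_bag : String) : Nat → List String → List String
  | 0, S => S
  | n + 1, S => pvIter bags my_bag n (pvStep bags my_bag S)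

-- Pre_ excludes exactly the inputs where the Python A does not return: a bag visited by A whose
-- rule is the empty dict (max([]) raises ValueError) or which lies on a cycle avoiding my_bag
-- (infinite recursion).
def Pre_check_bag (bags : List (String × List (String × Int))) (my_bag : String) (current_bag : String) : Prop :=
  ∀ b ∈ pvIter bags my_bag (bags.length + 1) [current_bag], b ≠ my_bag →
    (PySem.Dict.mk bags).get? b ≠ some [] ∧
    b ∉ pvIter bags my_bag (bags.length + 1) (PySem.Set.ofList (pvKids bags b))
instance (bags : List (String × List (String × Int))) (my_bag : String) (current_bag : String) : Decidable (Pre_check_bag bags my_bag current_bag) := by unfold Pre_check_bag; infer_instance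

def pvWitness_check_bag : (List (String × List (String × Int))) × String × String :=
  ([("a", [("b", 1)]), ("b", [("shiny gold", 2)])], "shiny gold", "a")

def Spec_check_bag (bags : List (String × List (String × Int))) (my_bag : String) (current_bag : String) (out : Int) : Prop := out = check_bag_alt bags my_bag current_bag
instance (bags : List (String × List (String × Int))) (my_bag : String) (current_bag : String) (out : Int) : Decidable (Spec_check_bag bags my_bag current_bag out) := by unfold Spec_check_bag; infer_instance

-- ===== CLAIM (what is proved, stated in full; the proofs are below) =====
def Claim_equal_check_bag : Prop := ∀ (bags : List (String × List (String × Int))) (my_bag : String) (current_bag : String), Dom_check_bag bags my_bag current_bag → Pre_check_bag bags my_bag current_bag → Spec_check_bag bags my_bag current_bag (check_bag bags my_bag current_bag)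

-- ===== LEMMAS AND PROOFS =====

-- path from b to my_bag along the bag graph (the list records the successive bags after b)
inductive IsPath (bags : List (String × List (String × Int))) (my_bag : String) : String → List String → Prop
  | nil : IsPath bags my_bag my_bag []
  | cons {b k l items} :
      PySem.Dict.get? (PySem.Dict.mk bags) b = some items →
      k ∈ items.map Prod.fst →
      IsPath bags my_bag k l →
      IsPath bags my_bag b (k :: l)

theorem pv_foldl_append_map {α β : Type} (g : α → β) :
    ∀ (L : List α) (acc : List β),
      L.foldl (fun acc kv => acc ++ [g kv]) acc = acc ++ L.map g := by
  intro L
  induction L with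
  | nil => intro acc; simp
  | cons a L ih => intro acc; simp [List.foldl, ih]

theorem pv_get?_mem (bags : List (String × List (String × Int))) :
    ∀ (b : String) (items : List (String × Int)),
      PySem.Dict.get? (PySem.Dict.mk bags) b = some items → b ∈ bags.map Prod.fst := by
  induction bags with
  | nil => intro b items h; simp [PySem.Dict.get?] at h
  | cons p rest ih =>
    obtain ⟨k, v⟩ := p
    intro b items h
    rw [PySem.Dict.get?_mk_cons] at h
    by_cases hk : k = b
    · simp [hk]
    · simp only [beq_iff_eq, hk, if_false] at h
      simp only [List.map_cons, List.mem_cons]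
      exact Or.inr (ih b items h)

-- every value of A's port is 0 or 1
theorem pv_go_zero_one (bags : List (String × List (String × Int))) (my_bag : String) :
    ∀ (f : Nat) (b : String),
      check_bag_go bags my_bag f b = 0 ∨ check_bag_go bags my_bag f b = 1 := by
  intro f
  induction f with
  | zero => intro b; left; simp [check_bag_go]
  | succ f ih =>
    intro b
    by_cases hb : b = my_bag
    · right; simp [check_bag_go, hb]
    · cases hg : PySem.Dict.get? (PySem.Dict.mk bags) b with
      | none => left; simp [check_bag_go, hb, hg]
      | some items =>
        simp only [check_bag_go, beq_iff_eq, hb, if_false, hg, pv_foldl_append_map,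
          List.nil_append]
        cases hm : PySem.List.max? (items.map (fun kv => check_bag_go bags my_bag f kv.1))
            (fun x => x) with
        | none => left; simp
        | some m =>
          have hmem := PySem.List.max?_mem hm
          rcases List.mem_map.mp hmem with ⟨kv, _, hkv⟩
          rcases ih kv.1 with h0 | h1
          · left; simp; rw [← hkv, h0]
          · right; simp; rw [← hkv, h1]

-- A sound: result 1 yields a path
theorem pv_go_path (bags : List (String × List (String × Int))) (my_bag : String) :
    ∀ (f : Nat) (b : String), check_bag_go bags my_bag f b = 1 →
      ∃ l, IsPath bags my_bag b l := by
  intro f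
  induction f with
  | zero => intro b h; simp [check_bag_go] at h
  | succ f ih =>
    intro b h
    by_cases hb : b = my_bag
    · exact ⟨[], hb ▸ IsPath.nil⟩
    · cases hg : PySem.Dict.get? (PySem.Dict.mk bags) b with
      | none => simp [check_bag_go, hb, hg] at h
      | some items =>
        simp only [check_bag_go, beq_iff_eq, hb, if_false, hg, pv_foldl_append_map,
          List.nil_append] at h
        cases hm : PySem.List.max? (items.map (fun kv => check_bag_go bags my_bag f kv.1))
            (fun x => x) with
        | none => rw [hm] at h; simp at h
        | some m =>
          rw [hm] at h; simp at h
          have hmem := PySem.List.max?_mem hm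
          rcases List.mem_map.mp hmem with ⟨kv, hkvmem, hkv⟩
          rcases ih kv.1 (by rw [hkv, h]) with ⟨l, hp⟩
          exact ⟨kv.1 :: l, IsPath.cons hg (List.mem_map.mpr ⟨kv, hkvmem, rfl⟩) hp⟩

-- A complete: a short enough path forces result 1
theorem pv_path_go (bags : List (String × List (String × Int))) (my_bag : String) :
    ∀ (l : List String) (b : String) (f : Nat), IsPath bags my_bag b l → l.length < f →
      check_bag_go bags my_bag f b = 1 := by
  intro l
  induction l with
  | nil =>
    intro b f hp hf
    cases hp
    cases f with
    | zero => omega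
    | succ f => simp [check_bag_go]
  | cons k l ih =>
    intro b f hp hf
    cases f with
    | zero => omega
    | succ f =>
      cases hp with
      | @cons _ _ _ items hg hk hp' =>
        by_cases hb : b = my_bag
        · simp [check_bag_go, hb]
        · simp only [check_bag_go, beq_iff_eq, hb, if_false, hg, pv_foldl_append_map,
            List.nil_append]
          have hk1 : check_bag_go bags my_bag f k = 1 :=
            ih k f hp' (by simp at hf; omega)
          have hone : (1 : Int) ∈ items.map (fun kv => check_bag_go bags my_bag f kv.1) := by
            rcases List.mem_map.mp hk with ⟨kv, hkvmem, hkveq⟩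
            exact List.mem_map.mpr ⟨kv, hkvmem, by rw [hkveq, hk1]⟩
          cases hm : PySem.List.max? (items.map (fun kv => check_bag_go bags my_bag f kv.1))
              (fun x => x) with
          | none =>
            rw [PySem.List.max?_eq_none_iff] at hm
            rw [hm] at hone; simp at hone
          | some m =>
            have hle := PySem.List.max?_isMax hm 1 hone
            have hmem := PySem.List.max?_mem hm
            rcases List.mem_map.mp hmem with ⟨kv', hkv'mem, hkv'⟩
            rcases pv_go_zero_one bags my_bag f kv'.1 with h0 | h1
            · rw [h0] at hkv'; omega
            · simp only [Option.getD_some]; omega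

-- suffix of a path is a path
theorem pv_path_suffix (bags : List (String × List (String × Int))) (my_bag : String) :
    ∀ (l1 l2 : List String) (b c : String), IsPath bags my_bag b (l1 ++ c :: l2) →
      IsPath bags my_bag c l2 := by
  intro l1
  induction l1 with
  | nil =>
    intro l2 b c hp
    cases hp with
    | cons _ _ hp' => exact hp'
  | cons a l1 ih =>
    intro l2 b c hp
    cases hp with
    | cons _ _ hp' => exact ih l2 a c hp'

-- path shortening: some path with no repeated node
theorem pv_path_shorten (bags : List (String × List (String × Int))) (my_bag : String) :
    ∀ (n : Nat) (l : List String) (b : String), l.length ≤ n → IsPath bags my_bag b l →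
      ∃ l', IsPath bags my_bag b l' ∧ l' ⊆ l ∧ (b :: l').Nodup := by
  intro n
  induction n with
  | zero =>
    intro l b hlen hp
    have : l = [] := List.eq_nil_of_length_eq_zero (by omega)
    subst this
    cases hp
    exact ⟨[], IsPath.nil, by simp, by simp⟩
  | succ n ih =>
    intro l b hlen hp
    by_cases hb : b ∈ l
    · rcases List.append_of_mem hb with ⟨l1, l2, rfl⟩
      have hp2 := pv_path_suffix bags my_bag l1 l2 b b hp
      have hl2 : l2.length ≤ n := by
        simp [List.length_append] at hlen; omega
      rcases ih l2 b hl2 hp2 with ⟨l', h1, h2, h3⟩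
      refine ⟨l', h1, ?_, h3⟩
      intro x hx
      have := h2 hx
      simp [List.mem_append]
      right; right; exact this
    · cases l with
      | nil =>
        cases hp
        exact ⟨[], IsPath.nil, by simp, by simp⟩
      | cons k rest =>
        cases hp with
        | @cons _ _ _ items hg hkm hp' =>
          have hrest : rest.length ≤ n := by simp at hlen; omega
          rcases ih rest k hrest hp' with ⟨rest', h1, h2, h3⟩
          refine ⟨k :: rest', IsPath.cons hg hkm h1, ?_, ?_⟩
          · intro x hx
            rcases List.mem_cons.mp hx with rfl | hx'
            · exact List.mem_cons_self
            · exact List.mem_cons_of_mem _ (h2 hx')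
          · refine List.nodup_cons.mpr ⟨?_, h3⟩
            intro hbm
            rcases List.mem_cons.mp hbm with rfl | hb'
            · exact hb (List.mem_cons_self)
            · exact hb (List.mem_cons_of_mem _ (h2 hb'))

-- every non-final node of a path is a key of bags
theorem pv_path_keys (bags : List (String × List (String × Int))) (my_bag : String) :
    ∀ (l : List String) (b : String), IsPath bags my_bag b l →
      ∀ x ∈ (b :: l).dropLast, x ∈ bags.map Prod.fst := by
  intro l
  induction l with
  | nil => intro b _ x hx; simp at hx
  | cons k rest ih =>
    intro b hp x hx
    cases hp with
    | @cons _ _ _ items hg hkm hp' =>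
      rw [List.dropLast_cons₂] at hx
      rcases List.mem_cons.mp hx with rfl | hx'
      · exact pv_get?_mem bags x items hg
      · exact ih k hp' x hx'

-- a nodup path has length ≤ bags.length
theorem pv_path_short (bags : List (String × List (String × Int))) (my_bag : String)
    (l : List String) (b : String) (hp : IsPath bags my_bag b l) (hn : (b :: l).Nodup) :
    l.length ≤ bags.length := by
  have hnd : ((b :: l).dropLast).Nodup := List.Nodup.sublist (List.dropLast_sublist _) hn
  have hsub : (b :: l).dropLast ⊆ bags.map Prod.fst := fun x hx =>
    pv_path_keys bags my_bag l b hp x hx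
  have hcard : ((b :: l).dropLast).toFinset.card = ((b :: l).dropLast).length :=
    List.toFinset_card_of_nodup hnd
  have hsubF : ((b :: l).dropLast).toFinset ⊆ (bags.map Prod.fst).toFinset := by
    intro x hx
    rw [List.mem_toFinset] at hx ⊢
    exact hsub hx
  have h1 : ((b :: l).dropLast).toFinset.card ≤ (bags.map Prod.fst).toFinset.card :=
    Finset.card_le_card hsubF
  have h2 : (bags.map Prod.fst).toFinset.card ≤ (bags.map Prod.fst).length :=
    List.toFinset_card_le _
  have h3 : ((b :: l).dropLast).length = l.length := by
    rw [List.length_dropLast]; simp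
  rw [hcard, h3] at h1
  simp at h2
  omega

-- ----- B side -----

theorem pv_fold_mono (bags : List (String × List (String × Int))) (my_bag : String) :
    ∀ (L acc : List String), acc ⊆ L.foldl (fun acc b =>
      if b != my_bag && PySem.Dict.contains (PySem.Dict.mk bags) b then
        PySem.Set.update acc ((((PySem.Dict.mk bags).get? b).getD []).map Prod.fst)
      else acc) acc := by
  intro L
  induction L with
  | nil => intro acc; simp [List.foldl]
  | cons a L ih =>
    intro acc
    simp only [List.foldl_cons]
    refine List.Subset.trans ?_ (ih _)
    by_cases hc : (a != my_bag && PySem.Dict.contains (PySem.Dict.mk bags) a) = true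
    · rw [if_pos hc]
      intro x hx
      exact (PySem.Set.mem_update _ _ _).mpr (Or.inl hx)
    · rw [if_neg hc]
      exact fun x hx => hx

theorem pv_step_mono (bags : List (String × List (String × Int))) (my_bag : String)
    (S : PySem.Set String) : S ⊆ altStep bags my_bag S :=
  pv_fold_mono bags my_bag S S

theorem pv_step_sound (bags : List (String × List (String × Int))) (my_bag : String) :
    ∀ (L acc : List String) (x : String), x ∈ L.foldl (fun acc b =>
      if b != my_bag && PySem.Dict.contains (PySem.Dict.mk bags) b then
        PySem.Set.update acc ((((PySem.Dict.mk bags).get? b).getD []).map Prod.fst)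
      else acc) acc →
      x ∈ acc ∨ ∃ b ∈ L, b ≠ my_bag ∧ ∃ items,
        PySem.Dict.get? (PySem.Dict.mk bags) b = some items ∧ x ∈ items.map Prod.fst := by
  intro L
  induction L with
  | nil => intro acc x hx; exact Or.inl hx
  | cons a L ih =>
    intro acc x hx
    simp only [List.foldl_cons] at hx
    rcases ih _ x hx with h | ⟨b, hb, hbne, items, hgi, hxi⟩
    · by_cases hc : (a != my_bag && PySem.Dict.contains (PySem.Dict.mk bags) a) = true
      · rw [if_pos hc] at h
        rcases (PySem.Set.mem_update _ _ _).mp h with h' | h'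
        · exact Or.inl h'
        · rw [Bool.and_eq_true] at hc
          obtain ⟨hne, hcont⟩ := hc
          have hne' : a ≠ my_bag := by simpa using hne
          rw [PySem.Dict.contains_eq_isSome_get?] at hcont
          cases hgi : PySem.Dict.get? (PySem.Dict.mk bags) a with
          | none => rw [hgi] at hcont; simp at hcont
          | some items =>
            refine Or.inr ⟨a, List.mem_cons_self, hne', items, hgi, ?_⟩
            rw [hgi] at h'
            simpa using h'
      · rw [if_neg hc] at h
        exact Or.inl h
    · exact Or.inr ⟨b, List.mem_cons_of_mem _ hb, hbne, items, hgi, hxi⟩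

theorem pv_step_complete (bags : List (String × List (String × Int))) (my_bag : String) :
    ∀ (L acc : List String) (b : String) (items : List (String × Int)), b ∈ L → b ≠ my_bag →
      PySem.Dict.get? (PySem.Dict.mk bags) b = some items →
      items.map Prod.fst ⊆ L.foldl (fun acc b =>
        if b != my_bag && PySem.Dict.contains (PySem.Dict.mk bags) b then
          PySem.Set.update acc ((((PySem.Dict.mk bags).get? b).getD []).map Prod.fst)
        else acc) acc := by
  intro L
  induction L with
  | nil => intro acc b items hb; simp at hb
  | cons a L ih =>
    intro acc b items hb hbne hg
    rcases List.mem_cons.mp hb with rfl | hb'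
    · have hc : (b != my_bag && PySem.Dict.contains (PySem.Dict.mk bags) b) = true := by
        rw [PySem.Dict.contains_eq_isSome_get?, hg]
        simp [hbne]
      simp only [List.foldl_cons]
      refine List.Subset.trans ?_ (pv_fold_mono bags my_bag L _)
      rw [if_pos hc, hg]
      intro x hx
      exact (PySem.Set.mem_update _ _ _).mpr (Or.inr (by simpa using hx))
    · simp only [List.foldl_cons]
      exact ih _ b items hb' hbne hg

theorem pv_iter_mono (bags : List (String × List (String × Int))) (my_bag : String) :
    ∀ (n : Nat) (S : PySem.Set String), S ⊆ (altStep bags my_bag)^[n] S := by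
  intro n
  induction n with
  | zero => intro S; simp
  | succ n ih =>
    intro S
    rw [Function.iterate_succ_apply]
    exact List.Subset.trans (pv_step_mono bags my_bag S) (ih _)

theorem pv_range_foldl (bags : List (String × List (String × Int))) (my_bag : String) :
    ∀ (n : Nat) (S : PySem.Set String),
      (List.range n).foldl (fun S _ => altStep bags my_bag S) S = (altStep bags my_bag)^[n] S := by
  intro n
  induction n with
  | zero => intro S; simp
  | succ n ih =>
    intro S
    rw [List.range_succ, List.foldl_append, ih, Function.iterate_succ_apply']
    simp [List.foldl]

-- B complete: a path of length ≤ i from a member of S puts my_bag into the i-th iterate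
theorem pv_iter_complete (bags : List (String × List (String × Int))) (my_bag : String) :
    ∀ (l : List String) (b : String) (S : PySem.Set String) (i : Nat),
      IsPath bags my_bag b l → b ∈ S → l.length ≤ i →
      my_bag ∈ (altStep bags my_bag)^[i] S := by
  intro l
  induction l with
  | nil =>
    intro b S i hp hbS _
    cases hp
    exact pv_iter_mono bags my_bag i S hbS
  | cons k l ih =>
    intro b S i hp hbS hlen
    cases i with
    | zero => simp at hlen
    | succ i =>
      by_cases hb : b = my_bag
      · exact pv_iter_mono bags my_bag (i + 1) S (hb ▸ hbS)
      · cases hp with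
        | @cons _ _ _ items hg hkm hp' =>
          have hkstep : k ∈ altStep bags my_bag S := by
            have := pv_step_complete bags my_bag S S b items hbS hb hg
            exact this hkm
          rw [Function.iterate_succ_apply]
          exact ih k (altStep bags my_bag S) i hp' hkstep (by simpa using hlen)

-- B sound: iterates only contain bags from which a path would witness one from a start bag
theorem pv_iter_sound_aux (bags : List (String × List (String × Int)))
    (my_bag current_bag : String) :
    ∀ (i : Nat) (S : PySem.Set String),
      (∀ y ∈ S, (∃ l, IsPath bags my_bag y l) → ∃ l, IsPath bags my_bag current_bag l) →
      ∀ x ∈ (altStep bags my_bag)^[i] S, (∃ l, IsPath bags my_bag x l) →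
        ∃ l, IsPath bags my_bag current_bag l := by
  intro i
  induction i with
  | zero => intro S h x hx; exact h x hx
  | succ i ih =>
    intro S h x hx hex
    rw [Function.iterate_succ_apply] at hx
    refine ih (altStep bags my_bag S) ?_ x hx hex
    intro y hy hye
    rcases pv_step_sound bags my_bag S S y hy with h' | ⟨b, hbS, hbne, items, hg, hyi⟩
    · exact h y h' hye
    · rcases hye with ⟨l, hpl⟩
      exact h b hbS ⟨y :: l, IsPath.cons hg hyi hpl⟩

theorem pv_iter_sound (bags : List (String × List (String × Int)))
    (my_bag current_bag : String) :
    ∀ (i : Nat) (x : String), x ∈ (altStep bags my_bag)^[i] [current_bag] →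
      (∃ l, IsPath bags my_bag x l) → ∃ l, IsPath bags my_bag current_bag l := by
  intro i x hx hex
  refine pv_iter_sound_aux bags my_bag current_bag i [current_bag] ?_ x hx hex
  intro y hy hye
  rcases List.mem_singleton.mp hy with rfl
  exact hye

-- ----- main -----

theorem pv_main (bags : List (String × List (String × Int))) (my_bag current_bag : String) :
    check_bag bags my_bag current_bag = check_bag_alt bags my_bag current_bag := by
  have hsingle : PySem.Set.ofList [current_bag] = [current_bag] :=
    PySem.Set.ofList_eq_self_of_nodup _ (by simp)
  show check_bag_go bags my_bag (bags.length + 1) current_bag =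
    if PySem.Set.contains ((List.range (bags.length + 1)).foldl
      (fun S _ => altStep bags my_bag S) (PySem.Set.ofList [current_bag])) my_bag then 1 else 0
  rw [hsingle, pv_range_foldl]
  by_cases hm : my_bag ∈ (altStep bags my_bag)^[bags.length + 1] [current_bag]
  · have hc : PySem.Set.contains ((altStep bags my_bag)^[bags.length + 1] [current_bag])
        my_bag = true := (PySem.Set.contains_iff _ _).mpr hm
    rw [hc]
    simp only [if_true]
    rcases pv_iter_sound bags my_bag current_bag (bags.length + 1) my_bag hm
        ⟨[], IsPath.nil⟩ with ⟨l, hp⟩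
    rcases pv_path_shorten bags my_bag l.length l current_bag le_rfl hp with ⟨l', hp', _, hnd⟩
    have hshort := pv_path_short bags my_bag l' current_bag hp' hnd
    exact pv_path_go bags my_bag l' current_bag (bags.length + 1) hp' (by omega)
  · have hc : PySem.Set.contains ((altStep bags my_bag)^[bags.length + 1] [current_bag])
        my_bag = false := by
      rw [← Bool.not_eq_true]
      intro hcc
      exact hm ((PySem.Set.contains_iff _ _).mp hcc)
    rw [hc]
    simp only [Bool.false_eq_true, if_false]
    rcases pv_go_zero_one bags my_bag (bags.length + 1) current_bag with h0 | h1
    · exact h0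
    · exfalso
      rcases pv_go_path bags my_bag (bags.length + 1) current_bag h1 with ⟨l, hp⟩
      rcases pv_path_shorten bags my_bag l.length l current_bag le_rfl hp with ⟨l', hp', _, hnd⟩
      have hshort := pv_path_short bags my_bag l' current_bag hp' hnd
      exact hm (pv_iter_complete bags my_bag l' current_bag [current_bag] (bags.length + 1)
        hp' (List.mem_singleton.mpr rfl) (by omega))

-- ===== VERDICT (by name: the statement is the Claim_ definition above) =====
theorem check_bag_spec : Claim_equal_check_bag := by
  intro bags my_bag current_bag _ _
  unfold Spec_check_bag
  exact pv_main bags my_bag current_bag
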